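-- pv_equiv track=rewrite | github.com/honggg112/main | Homework/assignment C/25570. 洋葱.py | dfs
-- ===== SOURCE A (Python) =====
-- def dfs(n, s, x, y):
--     if n == 1:
--         return s[x][y]  # 如果只剩一个元素，直接返回该元素值
--     if n == 0:
--         return 0
--
--     curr = 0
--     directions = [(0, 1), (1, 0), (0, -1), (-1, 0)] # 右、下、左、上
--
--     for i in range(4 * (n - 1)):
--         dx, dy = directions[(i // (n - 1)) % 4]  # 根据当前索引计算方向
--         x += dx
--         y += dy
--         curr += s[x][y]
--
--     return max(curr, dfs(n - 2, s, x + 1, y + 1))  # 递归到下一层，矩阵缩小一圈，起始坐标向内移动一格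
-- ===== SOURCE B (Python) =====
-- def dfs(n, s, x, y):
--     # iterative ring-by-ring scan instead of A's direction-table walk + recursion
--     sums = []
--     while n > 1:
--         top = sum(s[x][y + j] for j in range(n))
--         bot = sum(s[x + n - 1][y + j] for j in range(n))
--         mid = sum(s[x + i][y] + s[x + i][y + n - 1] for i in range(1, n - 1))
--         sums.append(top + bot + mid)
--         n, x, y = n - 2, x + 1, y + 1
--     best = s[x][y] if n == 1 else 0
--     for v in sums:
--         best = max(best, v)
--     return best
-- ===== Notes on version B (the rewrite author's own statement) =====
-- stated objective: simpler
-- what changed: Replaces A's recursive descent driven by a direction table and a single 4*(n-1)-step border walk with an iterative while-loop that sums each ring directly (top row, bottom row, interior side columns) and keeps a running maximum.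
import Mathlib
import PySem

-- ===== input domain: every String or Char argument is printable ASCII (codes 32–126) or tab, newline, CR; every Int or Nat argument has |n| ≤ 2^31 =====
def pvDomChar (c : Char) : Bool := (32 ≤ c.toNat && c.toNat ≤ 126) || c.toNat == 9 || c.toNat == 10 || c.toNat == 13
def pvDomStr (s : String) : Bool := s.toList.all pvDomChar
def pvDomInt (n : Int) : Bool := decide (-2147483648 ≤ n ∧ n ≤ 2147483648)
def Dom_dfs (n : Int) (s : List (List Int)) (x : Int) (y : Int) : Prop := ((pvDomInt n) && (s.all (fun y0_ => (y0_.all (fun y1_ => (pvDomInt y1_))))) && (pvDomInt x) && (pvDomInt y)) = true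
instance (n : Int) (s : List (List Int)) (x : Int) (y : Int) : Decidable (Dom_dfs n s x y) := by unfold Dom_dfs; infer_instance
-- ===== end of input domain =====

-- B replaces A's direction-table border walk + recursion by an iterative ring-by-ring scan
-- (top row, bottom row, interior side columns) with a running maximum: simpler, same cost.

-- shared lookup primitive: Python's s[x][y] (negative indices wrap; out of range raises,
-- which Pre_dfs excludes, so the default 0 is never the value on admitted inputs)
def pvGet (s : List (List Int)) (x y : Int) : Int :=
  PySem.List.pyGetD (PySem.List.pyGetD s x []) y 0

-- ===== PORT A =====
def pvDirections : List (Int × Int) := [(0, 1), (1, 0), (0, -1), (-1, 0)]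

def dfs (n : Int) (s : List (List Int)) (x : Int) (y : Int) : Int :=
  if n = 1 then pvGet s x y
  else if n = 0 then 0
  else if n < 0 then 0   -- totality guard: Python recurses forever here (RecursionError); outside Pre_dfs
  else
    let st := (PySem.List.pyRange 0 (4 * (n - 1)) 1).foldl
      (fun (st : Int × Int × Int) i =>
        let d := PySem.List.pyGetD pvDirections (PySem.Int.mod (PySem.Int.floordiv i (n - 1)) 4) (0, 0)
        (st.1 + pvGet s (st.2.1 + d.1) (st.2.2 + d.2), st.2.1 + d.1, st.2.2 + d.2))
      (0, x, y)
    max st.1 (dfs (n - 2) s (st.2.1 + 1) (st.2.2 + 1))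
termination_by n.toNat
decreasing_by omega

-- ===== PORT B =====
def ringSum (s : List (List Int)) (n x y : Int) : Int :=
  (PySem.List.pyRange 0 n 1).foldl (fun c j => c + pvGet s x (y + j)) 0
  + (PySem.List.pyRange 0 n 1).foldl (fun c j => c + pvGet s (x + n - 1) (y + j)) 0
  + (PySem.List.pyRange 1 (n - 1) 1).foldl (fun c i => c + (pvGet s (x + i) y + pvGet s (x + i) (y + n - 1))) 0

def ringLoop (s : List (List Int)) (n x y : Int) (sums : List Int) : List Int × Int × Int × Int :=
  if n > 1 then ringLoop s (n - 2) (x + 1) (y + 1) (sums ++ [ringSum s n x y])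
  else (sums, n, x, y)
termination_by n.toNat
decreasing_by omega

def dfs_alt (n : Int) (s : List (List Int)) (x : Int) (y : Int) : Int :=
  let r := ringLoop s n x y []
  let best := if r.2.1 = 1 then pvGet s r.2.2.1 r.2.2.2 else 0
  r.1.foldl max best

-- ===== PRECONDITION & SPEC =====
def pvRowLen (s : List (List Int)) (i : Int) : Int := ((PySem.List.pyGet? s i).getD []).length

-- exactly the inputs on which the Python A returns: n ≥ 0 (negative n recurses forever) and, unless
-- n = 0, every cell of the n×n block at (x,y) — the union of all rings A visits — is a valid Python
-- index pair (negative in-range indices, which Python wraps, are admitted): the row indices x..x+n-1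
-- lie in [-len(s), len(s)) and on every row of s they reach, the column indices y..y+n-1 are valid
def Pre_dfs (n : Int) (s : List (List Int)) (x : Int) (y : Int) : Prop :=
  0 ≤ n ∧ (n = 0 ∨
    (-(s.length : Int) ≤ x ∧ x + n ≤ (s.length : Int) ∧
      ∀ r ∈ List.range s.length,
        ((x ≤ (r : Int) ∧ (r : Int) < x + n) ∨
          (x ≤ (r : Int) - (s.length : Int) ∧ (r : Int) - (s.length : Int) < x + n)) →
          (-(pvRowLen s (r : Int)) ≤ y ∧ y + n ≤ pvRowLen s (r : Int))))
instance (n : Int) (s : List (List Int)) (x : Int) (y : Int) : Decidable (Pre_dfs n s x y) := by unfold Pre_dfs; infer_instance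

def pvWitness_dfs : Int × List (List Int) × Int × Int := (3, [[1, 2, 3], [4, 5, 6], [7, 8, 9]], 0, 0)

def Spec_dfs (n : Int) (s : List (List Int)) (x : Int) (y : Int) (out : Int) : Prop := out = dfs_alt n s x y
instance (n : Int) (s : List (List Int)) (x : Int) (y : Int) (out : Int) : Decidable (Spec_dfs n s x y out) := by unfold Spec_dfs; infer_instance

-- ===== CLAIM (what is proved, stated in full; the proofs are below) =====
def Claim_equal_dfs : Prop := ∀ (n : Int) (s : List (List Int)) (x : Int) (y : Int), Dom_dfs n s x y → Pre_dfs n s x y → Spec_dfs n s x y (dfs n s x y)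

-- ===== LEMMAS AND PROOFS =====

-- fold of a Python for-loop summing f over range a..b, as a Finset sum
theorem pv_foldl_sumRange (a b : Int) (f : Int → Int) (c : Int) :
    (PySem.List.pyRange a b 1).foldl (fun c j => c + f j) c
      = c + ∑ t ∈ Finset.range (b - a).toNat, f (a + t) := by
  rw [PySem.List.pyRange_one, List.foldl_map]
  generalize (b - a).toNat = k
  induction k with
  | zero => simp
  | succ k ih =>
      rw [List.range_succ, List.foldl_append, ih, Finset.sum_range_succ]
      simp [add_assoc]

-- a constant-direction walk segment of A's loop
theorem pv_walk (s : List (List Int)) (dx dy : Int) :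
    ∀ (l : List Int) (c x y : Int),
      l.foldl (fun (st : Int × Int × Int) (_ : Int) =>
          (st.1 + pvGet s (st.2.1 + dx) (st.2.2 + dy), st.2.1 + dx, st.2.2 + dy)) (c, x, y)
        = (c + ∑ t ∈ Finset.range l.length, pvGet s (x + ((t : Int) + 1) * dx) (y + ((t : Int) + 1) * dy),
           x + (l.length : Int) * dx, y + (l.length : Int) * dy) := by
  intro l
  induction l with
  | nil => intro c x y; simp
  | cons h t ih =>
      intro c x y
      simp only [List.foldl_cons, ih, List.length_cons, Prod.mk.injEq]
      refine ⟨?_, by push_cast; ring, by push_cast; ring⟩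
      have hc : ∀ t' ∈ Finset.range t.length,
          pvGet s (x + dx + ((t' : Int) + 1) * dx) (y + dy + ((t' : Int) + 1) * dy)
            = pvGet s (x + (((t' : Int) + 1) + 1) * dx) (y + (((t' : Int) + 1) + 1) * dy) := by
        intro t' _; ring_nf
      rw [Finset.sum_congr rfl hc, Finset.sum_range_succ']
      push_cast
      ring_nf

-- on one segment of A's loop the direction lookup is constant
theorem pv_seg_const (s : List (List Int)) (m kq a b : Int) (hm : 0 < m)
    (h4 : 0 ≤ kq) (h4' : kq < 4) (hlo : kq * m ≤ a) (hhi : b ≤ (kq + 1) * m)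
    (init : Int × Int × Int) :
    (PySem.List.pyRange a b 1).foldl
      (fun (st : Int × Int × Int) i =>
        let d := PySem.List.pyGetD pvDirections (PySem.Int.mod (PySem.Int.floordiv i m) 4) (0, 0)
        (st.1 + pvGet s (st.2.1 + d.1) (st.2.2 + d.2), st.2.1 + d.1, st.2.2 + d.2))
      init
    = (PySem.List.pyRange a b 1).foldl
      (fun (st : Int × Int × Int) (_ : Int) =>
        (st.1 + pvGet s (st.2.1 + (PySem.List.pyGetD pvDirections kq (0, 0)).1)
                        (st.2.2 + (PySem.List.pyGetD pvDirections kq (0, 0)).2),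
         st.2.1 + (PySem.List.pyGetD pvDirections kq (0, 0)).1,
         st.2.2 + (PySem.List.pyGetD pvDirections kq (0, 0)).2))
      init := by
  apply PySem.List.foldl_congr_mem
  intro acc i hi
  rw [PySem.List.mem_pyRange_one] at hi
  have hfd : PySem.Int.floordiv i m = kq := by
    rw [PySem.Int.floordiv_eq_iff_of_pos hm]
    constructor
    · omega
    · omega
  have hmod : PySem.Int.mod kq 4 = kq := by
    rw [PySem.Int.mod_eq_emod_of_pos (by norm_num)]
    omega
  simp only [hfd, hmod]

-- A's whole border loop computes B's ring sum and returns to the start position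
theorem pv_foldA (s : List (List Int)) (n x y : Int) (hn : 2 ≤ n) :
    (PySem.List.pyRange 0 (4 * (n - 1)) 1).foldl
      (fun (st : Int × Int × Int) i =>
        let d := PySem.List.pyGetD pvDirections (PySem.Int.mod (PySem.Int.floordiv i (n - 1)) 4) (0, 0)
        (st.1 + pvGet s (st.2.1 + d.1) (st.2.2 + d.2), st.2.1 + d.1, st.2.2 + d.2))
      (0, x, y)
    = (ringSum s n x y, x, y) := by
  obtain ⟨K, hK⟩ : ∃ K : Nat, n = (K : Int) + 2 := ⟨(n - 2).toNat, by omega⟩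
  subst hK
  have hm : (K : Int) + 2 - 1 = (K : Int) + 1 := by ring
  rw [hm]
  set m : Int := (K : Int) + 1 with hmdef
  have hm0 : 0 < m := by omega
  have hsplit : PySem.List.pyRange 0 (4 * m) 1
      = ((PySem.List.pyRange 0 m 1 ++ PySem.List.pyRange m (2 * m) 1) ++ PySem.List.pyRange (2 * m) (3 * m) 1) ++ PySem.List.pyRange (3 * m) (4 * m) 1 := by
    rw [← PySem.List.pyRange_one_append 0 m (2 * m) (by omega) (by omega)]
    rw [← PySem.List.pyRange_one_append 0 (2 * m) (3 * m) (by omega) (by omega)]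
    rw [← PySem.List.pyRange_one_append 0 (3 * m) (4 * m) (by omega) (by omega)]
  rw [hsplit, List.foldl_append, List.foldl_append, List.foldl_append]
  rw [pv_seg_const s m 0 0 m hm0 (by omega) (by omega) (by omega) (by omega)]
  rw [pv_seg_const s m 1 m (2 * m) hm0 (by omega) (by omega) (by omega) (by omega)]
  rw [pv_seg_const s m 2 (2 * m) (3 * m) hm0 (by omega) (by omega) (by omega) (by omega)]
  rw [pv_seg_const s m 3 (3 * m) (4 * m) hm0 (by omega) (by omega) (by omega) (by omega)]
  have hd0 : PySem.List.pyGetD pvDirections 0 (0, 0) = ((0 : Int), (1 : Int)) := by decide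
  have hd1 : PySem.List.pyGetD pvDirections 1 (0, 0) = ((1 : Int), (0 : Int)) := by decide
  have hd2 : PySem.List.pyGetD pvDirections 2 (0, 0) = ((0 : Int), (-1 : Int)) := by decide
  have hd3 : PySem.List.pyGetD pvDirections 3 (0, 0) = ((-1 : Int), (0 : Int)) := by decide
  simp only [hd0, hd1, hd2, hd3]
  rw [pv_walk s 0 1, pv_walk s 1 0, pv_walk s 0 (-1), pv_walk s (-1) 0]
  simp only [PySem.List.length_pyRange_one]
  have hl1 : (m - 0).toNat = K + 1 := by omega
  have hl2 : (2 * m - m).toNat = K + 1 := by omega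
  have hl3 : (3 * m - 2 * m).toNat = K + 1 := by omega
  have hl4 : (4 * m - 3 * m).toNat = K + 1 := by omega
  rw [hl1, hl2, hl3, hl4]
  rw [ringSum]
  rw [pv_foldl_sumRange 0 ((K : Int) + 2) (fun j => pvGet s x (y + j)) 0]
  rw [pv_foldl_sumRange 0 ((K : Int) + 2) (fun j => pvGet s (x + ((K : Int) + 2) - 1) (y + j)) 0]
  rw [pv_foldl_sumRange 1 ((K : Int) + 2 - 1) (fun i => pvGet s (x + i) y + pvGet s (x + i) (y + ((K : Int) + 2) - 1)) 0]
  have ht1 : ((K : Int) + 2 - 0).toNat = K + 2 := by omega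
  have ht2 : ((K : Int) + 2 - 1 - 1).toNat = K := by omega
  rw [ht1, ht2]
  simp only [Prod.mk.injEq]
  refine ⟨?_, by push_cast; ring, by push_cast; ring⟩
  push_cast
  ring_nf
  have h1 : ∑ t ∈ Finset.range (2 + K), pvGet s x (y + (t : Int))
      = pvGet s x y + ∑ t ∈ Finset.range (1 + K), pvGet s x (1 + (t : Int) + y) := by
    have h : 2 + K = (1 + K) + 1 := by omega
    rw [h, Finset.sum_range_succ']
    push_cast
    ring_nf
  have h2 : ∑ t ∈ Finset.range (2 + K), pvGet s (1 + x + (K : Int)) (y + (t : Int))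
      = (∑ t ∈ Finset.range (1 + K), pvGet s (1 + x + (K : Int)) (y + (t : Int)))
        + pvGet s (1 + x + (K : Int)) (1 + y + (K : Int)) := by
    have h : 2 + K = (1 + K) + 1 := by omega
    rw [h, Finset.sum_range_succ]
    push_cast
    ring_nf
  have h3 : ∑ t ∈ Finset.range (1 + K), pvGet s (1 + x + (K : Int)) (y + (K : Int) - (t : Int))
      = ∑ t ∈ Finset.range (1 + K), pvGet s (1 + x + (K : Int)) (y + (t : Int)) := by
    rw [← Finset.sum_range_reflect (fun j => pvGet s (1 + x + (K : Int)) (y + (j : Int))) (1 + K)]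
    apply Finset.sum_congr rfl
    intro t ht
    simp only [Finset.mem_range] at ht
    congr 1
    have hc : ((1 + K - 1 - t : Nat) : Int) = (K : Int) - (t : Int) := by omega
    rw [hc]
    ring
  have h4a : ∑ t ∈ Finset.range (1 + K), pvGet s (x + (K : Int) - (t : Int)) y
      = ∑ t ∈ Finset.range (1 + K), pvGet s (x + (t : Int)) y := by
    rw [← Finset.sum_range_reflect (fun j => pvGet s (x + (j : Int)) y) (1 + K)]
    apply Finset.sum_congr rfl
    intro t ht
    simp only [Finset.mem_range] at ht
    congr 1
    have hc : ((1 + K - 1 - t : Nat) : Int) = (K : Int) - (t : Int) := by omega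
    rw [hc]
    ring
  have h4b : ∑ t ∈ Finset.range (1 + K), pvGet s (x + (t : Int)) y
      = pvGet s x y + ∑ t ∈ Finset.range K, pvGet s (1 + x + (t : Int)) y := by
    have h : 1 + K = K + 1 := by omega
    rw [h, Finset.sum_range_succ']
    push_cast
    ring_nf
  have h5 : ∑ t ∈ Finset.range (1 + K), pvGet s (1 + x + (t : Int)) (1 + y + (K : Int))
      = (∑ t ∈ Finset.range K, pvGet s (1 + x + (t : Int)) (1 + y + (K : Int)))
        + pvGet s (1 + x + (K : Int)) (1 + y + (K : Int)) := by
    have h : 1 + K = K + 1 := by omega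
    rw [h, Finset.sum_range_succ]
  have h6 : ∑ t ∈ Finset.range K, (pvGet s (1 + x + (t : Int)) y + pvGet s (1 + x + (t : Int)) (1 + y + (K : Int)))
      = (∑ t ∈ Finset.range K, pvGet s (1 + x + (t : Int)) y)
        + ∑ t ∈ Finset.range K, pvGet s (1 + x + (t : Int)) (1 + y + (K : Int)) := by
    rw [Finset.sum_add_distrib]
  linarith [h1, h2, h3, h4a, h4b, h5, h6]

theorem pv_ringLoop_acc (s : List (List Int)) (n x y : Int) :
    ∀ acc : List Int, ringLoop s n x y acc
      = (acc ++ (ringLoop s n x y []).1, (ringLoop s n x y []).2) := by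
  suffices H : ∀ (k : Nat) (n x y : Int), n.toNat ≤ k → ∀ acc : List Int,
      ringLoop s n x y acc = (acc ++ (ringLoop s n x y []).1, (ringLoop s n x y []).2) from
    H n.toNat n x y le_rfl
  intro k
  induction k with
  | zero =>
      intro n x y hk acc
      have h : ¬ n > 1 := by omega
      conv_lhs => rw [ringLoop]
      conv_rhs => rw [ringLoop]
      simp [h]
  | succ k ih =>
      intro n x y hk acc
      by_cases h : n > 1
      · conv_lhs => rw [ringLoop]
        conv_rhs => rw [ringLoop]
        simp only [h, if_pos]
        rw [ih (n - 2) (x + 1) (y + 1) (by omega) (acc ++ [ringSum s n x y]),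
            ih (n - 2) (x + 1) (y + 1) (by omega) ([] ++ [ringSum s n x y])]
        simp
      · conv_lhs => rw [ringLoop]
        conv_rhs => rw [ringLoop]
        simp [h]

theorem pv_foldl_max_swap (l : List Int) : ∀ a b : Int, max b (l.foldl max a) = l.foldl max (max a b) := by
  induction l with
  | nil => intro a b; simp [max_comm]
  | cons c t ih =>
      intro a b
      simp only [List.foldl_cons]
      rw [ih (max a c) b]
      have : max (max a c) b = max (max a b) c := by omega
      rw [this]

theorem pv_main (n : Int) (s : List (List Int)) (x y : Int) : dfs n s x y = dfs_alt n s x y := by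
  suffices H : ∀ (k : Nat) (n x y : Int), n.toNat ≤ k → dfs n s x y = dfs_alt n s x y from
    H n.toNat n x y le_rfl
  intro k
  induction k with
  | zero =>
      intro n x y hk
      have h2 : ¬ n > 1 := by omega
      rw [dfs, dfs_alt, ringLoop]
      by_cases h1 : n = 1
      · simp [h1]
      · by_cases h0 : n = 0
        · simp [h0]
        · have hneg : n < 0 := by omega
          simp [h1, h0, hneg, h2]
  | succ k ih =>
      intro n x y hk
      by_cases h2 : n > 1
      · have hn2 : (2 : Int) ≤ n := by omega
        rw [dfs]
        rw [if_neg (by omega), if_neg (by omega), if_neg (by omega)]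
        rw [pv_foldA s n x y hn2]
        rw [dfs_alt]
        conv_rhs => rw [ringLoop]
        rw [if_pos h2, pv_ringLoop_acc s (n - 2) (x + 1) (y + 1) ([] ++ [ringSum s n x y])]
        simp only [List.nil_append, List.singleton_append, List.foldl_cons]
        rw [ih (n - 2) (x + 1) (y + 1) (by omega), dfs_alt]
        exact pv_foldl_max_swap _ _ _
      · have h2' : ¬ n > 1 := h2
        rw [dfs, dfs_alt, ringLoop]
        by_cases h1 : n = 1
        · simp [h1]
        · by_cases h0 : n = 0
          · simp [h0]
          · have hneg : n < 0 := by omega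
            simp [h1, h0, hneg, h2']

-- ===== VERDICT (by name: the statement is the Claim_ definition above) =====
theorem dfs_spec : Claim_equal_dfs := by
  intro n s x y _ _
  unfold Spec_dfs
  exact pv_main n s x y
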